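-- pv_equiv track=rewrite | github.com/ppanchal97/compsci | 6.0001/unit_1/pset1/longest_alpha_substring_efficient.py | longest_alpha_substring
-- ===== SOURCE A (Python) =====
-- def longest_alpha_substring(s):
--     substrings = []
--     substring = []
--
--     for i in range(0, len(s)):
--         if i != 0:
--             if ord(substring[-1]) <= ord(s[i]):
--                 substring.append(s[i])
--             else:
--                 if len(substring) > 1:
--                     substrings.append(''.join(substring))
--                 substring = []
--                 substring.append(s[i])
--         else:
--             substring.append(s[i])
--
--         # completely alphabetical string
--         if i == len(s) - 1:
--             substrings.append(''.join(substring))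
--
--     # return first largest alphabetical substring
--     return sorted(substrings, key=len)[-1]
-- ===== SOURCE B (Python) =====
-- def longest_alpha_substring(s):
--     best_start = 0
--     best_len = 0
--     start = 0
--     for i in range(1, len(s) + 1):
--         if i == len(s) or s[i] < s[i - 1]:
--             if i - start >= best_len:
--                 best_start = start
--                 best_len = i - start
--             start = i
--     return s[best_start:best_start + best_len]
-- ===== Notes on version B (the rewrite author's own statement) =====
-- stated objective: faster
-- what changed: Replaces collecting all non-decreasing runs into a list and stable-sorting it by length with a single pass that tracks the start/length of the last run of maximal length.
-- outside the precondition, e.g. on longest_alpha_substring(''): A raises IndexError, B returns ''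
import Mathlib
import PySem

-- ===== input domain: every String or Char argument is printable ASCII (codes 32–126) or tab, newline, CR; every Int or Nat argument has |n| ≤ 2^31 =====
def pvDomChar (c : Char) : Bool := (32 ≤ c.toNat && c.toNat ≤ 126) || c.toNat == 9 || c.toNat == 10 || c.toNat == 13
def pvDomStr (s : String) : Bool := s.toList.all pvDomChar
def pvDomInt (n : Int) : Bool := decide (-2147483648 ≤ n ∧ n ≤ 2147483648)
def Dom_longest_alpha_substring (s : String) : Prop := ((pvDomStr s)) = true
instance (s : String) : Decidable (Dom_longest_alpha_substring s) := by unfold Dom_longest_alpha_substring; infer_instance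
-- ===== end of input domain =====

-- B replaces A's collect-all-runs-then-stable-sort with a single pass keeping the last maximal run's
-- start/length (objective: faster, O(n) vs O(n log n) sort with O(n) stored runs).

-- ===== PORT A =====
def longest_alpha_substring (s : String) : String :=
  let cs := s.toList
  let n : Int := cs.length
  let st := (PySem.List.enumerate cs 0).foldl
    (fun (st : List String × List Char) (p : Int × Char) =>
      let (substrings, substring) :=
        if p.1 ≠ 0 then
          -- 'substring[-1]' is always in range when this branch runs; getD default is unreachable
          if ((PySem.List.pyGet? st.2 (-1)).getD ' ').toNat ≤ p.2.toNat then
            (st.1, st.2 ++ [p.2])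
          else
            ((if st.2.length > 1 then st.1 ++ [String.ofList st.2] else st.1), ([] : List Char) ++ [p.2])
        else
          (st.1, st.2 ++ [p.2])
      if p.1 = n - 1 then (substrings ++ [String.ofList substring], substring) else (substrings, substring))
    ([], [])
  -- sorted(substrings, key=len)[-1]; the [-1] raises IndexError iff s == '' (excluded by Pre_)
  (PySem.List.pyGet? (PySem.List.sorted st.1 (fun t => t.toList.length)) (-1)).getD ""

-- ===== PORT B =====
def longest_alpha_substring_alt (s : String) : String :=
  let cs := s.toList
  let n : Int := cs.length
  -- state (best_start, best_len, start)
  let acc := (PySem.List.pyRange 1 (n + 1)).foldl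
    (fun (acc : Int × Int × Int) i =>
      if i = n ∨ ((PySem.List.pyGet? cs i).getD ' ').toNat < ((PySem.List.pyGet? cs (i - 1)).getD ' ').toNat then
        if acc.2.1 ≤ i - acc.2.2 then (acc.2.2, i - acc.2.2, i) else (acc.1, acc.2.1, i)
      else acc)
    (0, 0, 0)
  String.ofList (PySem.List.slice cs (some acc.1) (some (acc.1 + acc.2.1)))

-- ===== PRECONDITION & SPEC =====
-- A raises IndexError on the empty string (sorted([])[-1]); Pre_ excludes exactly that input.
def Pre_longest_alpha_substring (s : String) : Prop := s ≠ ""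
instance (s : String) : Decidable (Pre_longest_alpha_substring s) := by unfold Pre_longest_alpha_substring; infer_instance
def pvWitness_longest_alpha_substring : String := "baAb"

def Spec_longest_alpha_substring (s : String) (out : String) : Prop := out = longest_alpha_substring_alt s
instance (s : String) (out : String) : Decidable (Spec_longest_alpha_substring s out) := by unfold Spec_longest_alpha_substring; infer_instance

-- ===== CLAIM (what is proved, stated in full; the proofs are below) =====
def Claim_equal_longest_alpha_substring : Prop := ∀ (s : String), Dom_longest_alpha_substring s → Pre_longest_alpha_substring s → Spec_longest_alpha_substring s (longest_alpha_substring s)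

-- ===== LEMMAS AND PROOFS =====

-- step functions (identical to the port lambdas)
def pvStepA (n : Int) (st : List String × List Char) (p : Int × Char) : List String × List Char :=
  let (substrings, substring) :=
    if p.1 ≠ 0 then
      if ((PySem.List.pyGet? st.2 (-1)).getD ' ').toNat ≤ p.2.toNat then
        (st.1, st.2 ++ [p.2])
      else
        ((if st.2.length > 1 then st.1 ++ [String.ofList st.2] else st.1), ([] : List Char) ++ [p.2])
    else
      (st.1, st.2 ++ [p.2])
  if p.1 = n - 1 then (substrings ++ [String.ofList substring], substring) else (substrings, substring)

def pvStepB (cs : List Char) (n : Int) (acc : Int × Int × Int) (i : Int) : Int × Int × Int :=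
  if i = n ∨ ((PySem.List.pyGet? cs i).getD ' ').toNat < ((PySem.List.pyGet? cs (i - 1)).getD ' ').toNat then
    if acc.2.1 ≤ i - acc.2.2 then (acc.2.2, i - acc.2.2, i) else (acc.1, acc.2.1, i)
  else acc

theorem portA_eq (s : String) : longest_alpha_substring s =
    (PySem.List.pyGet? (PySem.List.sorted
      (List.foldl (pvStepA (s.toList.length : Int)) ([], []) (PySem.List.enumerate s.toList 0)).1
      (fun t => t.toList.length)) (-1)).getD "" := rfl

-- last-max selection (ties -> later element), as the fold it is
def pvSel (b : Option (List Char)) (y : List Char) : Option (List Char) :=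
  match b with | none => some y | some x => if x.length ≤ y.length then some y else some x
def pvPickL (b : Option (List Char)) (l : List (List Char)) : Option (List Char) := l.foldl pvSel b
def pvSelS (b : Option String) (y : String) : Option String :=
  match b with | none => some y | some x => if x.toList.length ≤ y.toList.length then some y else some x
def pvPickS (b : Option String) (l : List String) : Option String := l.foldl pvSelS b

theorem pvInsertBy_ne_nil (bf : String → String → Bool) (x : String) (m : List String) :
    PySem.List.insertBy bf x m ≠ [] := by
  cases m with
  | nil => simp [PySem.List.insertBy]
  | cons y ys => simp only [PySem.List.insertBy]; split <;> simp

theorem pvGetLast?_cons_ne {α : Type} (y : α) (ys : List α) (h : ys ≠ []) :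
    (y :: ys).getLast? = ys.getLast? := by
  cases ys with
  | nil => exact absurd rfl h
  | cons z zs => simp [List.getLast?_cons]

theorem pvGetLast?_insertBy (x : String) (m : List String)
    (hp : m.Pairwise (fun a b => a.toList.length ≤ b.toList.length)) :
    (PySem.List.insertBy (fun a b => decide (a.toList.length < b.toList.length)) x m).getLast?
      = pvSelS m.getLast? x := by
  induction m with
  | nil => simp [PySem.List.insertBy, pvSelS]
  | cons y ys ih =>
    rw [List.pairwise_cons] at hp
    simp only [PySem.List.insertBy]
    split
    · -- x inserted in front: last of y::ys stays
      rename_i hlt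
      simp only [decide_eq_true_eq] at hlt
      rw [pvGetLast?_cons_ne x (y :: ys) (by simp)]
      cases h : (y :: ys).getLast? with
      | none => simp at h
      | some b =>
        have hb : x.toList.length < b.toList.length := by
          have hmem := List.mem_of_getLast? h
          rcases List.mem_cons.1 hmem with rfl | hmem'
          · exact hlt
          · exact lt_of_lt_of_le hlt (hp.1 b hmem')
        have hb2 : ¬ b.length ≤ x.length := by
          have := Nat.not_le.2 hb; simpa using this
        simp [pvSelS, hb2]
    · rename_i hnlt
      simp only [decide_eq_true_eq, Nat.not_lt] at hnlt
      have hne := pvInsertBy_ne_nil (fun a b => decide (a.toList.length < b.toList.length)) x ys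
      rw [pvGetLast?_cons_ne y _ hne]
      cases ys with
      | nil =>
        have h2 : ¬ x.length < y.length := by simpa using Nat.not_lt.2 hnlt
        simp [PySem.List.insertBy, pvSelS, hnlt, h2]
      | cons z zs =>
        rw [ih hp.2, pvGetLast?_cons_ne y (z :: zs) (by simp)]

theorem pvSorted_getLast (l : List String) :
    (PySem.List.sorted l (fun t => t.toList.length)).getLast? = pvPickS none l := by
  induction l using List.reverseRecOn with
  | nil => rfl
  | append_singleton l x ih =>
    rw [PySem.List.sorted_eq_foldl_insertBy, List.foldl_append, ← PySem.List.sorted_eq_foldl_insertBy]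
    simp only [List.foldl_cons, List.foldl_nil]
    rw [pvGetLast?_insertBy x _ (PySem.List.sorted_pairwise l _), ih]
    simp [pvPickS, pvSelS]

theorem pvPick_map : ∀ (l : List (List Char)) (b : Option (List Char)),
    pvPickS (b.map String.ofList) (l.map String.ofList) = (pvPickL b l).map String.ofList := by
  intro l
  induction l with
  | nil => intro b; rfl
  | cons x t ih =>
    intro b
    have hstep : pvSelS (b.map String.ofList) (String.ofList x) = (pvSel b x).map String.ofList := by
      cases b with
      | none => rfl
      | some z => simp [pvSelS, pvSel]; split <;> simp
    simp only [List.map_cons, pvPickS, pvPickL, List.foldl_cons] at *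
    rw [hstep, ih]

theorem pvPick_skip (a : List Char) : ∀ (l : List (List Char)) (b₁ b₂ : Option (List Char)),
    (b₁ = b₂ ∨ ∃ x, b₁ = some x ∧ x.length ≤ a.length ∧
      (b₂ = none ∨ ∃ z, b₂ = some z ∧ z.length ≤ x.length)) →
    pvPickL b₁ (l ++ [a]) = pvPickL b₂ (l ++ [a]) := by
  intro l
  induction l with
  | nil =>
    intro b₁ b₂ h
    rcases h with rfl | ⟨x, rfl, hxa, h2⟩
    · rfl
    rcases h2 with rfl | ⟨z, rfl, hzx⟩
    · simp [pvPickL, pvSel, hxa]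
    · simp [pvPickL, pvSel, hxa, le_trans hzx hxa]
  | cons y t ih =>
    intro b₁ b₂ h
    simp only [List.cons_append, pvPickL, List.foldl_cons]
    apply ih
    rcases h with rfl | ⟨x, rfl, hxa, h2⟩
    · left; rfl
    rcases h2 with rfl | ⟨z, rfl, hzx⟩
    · -- b₂ = none
      by_cases hxy : x.length ≤ y.length
      · left; simp [pvSel, hxy]
      · right; exact ⟨x, by simp [pvSel, hxy], hxa, Or.inr ⟨y, rfl, Nat.le_of_lt (Nat.not_le.1 hxy)⟩⟩
    · by_cases hxy : x.length ≤ y.length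
      · left; simp [pvSel, hxy, le_trans hzx hxy]
      · right
        refine ⟨x, by simp [pvSel, hxy], hxa, Or.inr ?_⟩
        by_cases hzy : z.length ≤ y.length
        · exact ⟨y, by simp [pvSel, hzy], Nat.le_of_lt (Nat.not_le.1 hxy)⟩
        · exact ⟨z, by simp [pvSel, hzy], hzx⟩

theorem pvPick_filter (a : List Char) (ha : a ≠ []) : ∀ (l : List (List Char)) (b : Option (List Char)),
    (∀ x ∈ l, ¬ 1 < x.length → x.length ≤ a.length) →
    pvPickL b (l.filter (fun r => decide (1 < r.length)) ++ [a]) = pvPickL b (l ++ [a]) := by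
  intro l
  induction l with
  | nil => intro b _; rfl
  | cons x t ih =>
    intro b hH
    by_cases hx : 1 < x.length
    · simp only [List.filter_cons, hx, decide_true, List.cons_append, pvPickL, List.foldl_cons]
      exact ih (pvSel b x) (fun y hy => hH y (List.mem_cons_of_mem _ hy))
    · have hfe : (x :: t).filter (fun r => decide (1 < r.length)) = t.filter (fun r => decide (1 < r.length)) := by
        simp [List.filter_cons, hx]
      rw [hfe, ih b (fun y hy => hH y (List.mem_cons_of_mem _ hy))]
      refine (pvPick_skip a t (pvSel b x) b ?_).symm
      have hxa : x.length ≤ a.length := hH x (List.mem_cons_self) hx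
      cases b with
      | none => exact Or.inr ⟨x, rfl, hxa, Or.inl rfl⟩
      | some z =>
        by_cases hzx : z.length ≤ x.length
        · exact Or.inr ⟨x, by simp [pvSel, hzx], hxa, Or.inr ⟨z, rfl, hzx⟩⟩
        · left; simp [pvSel, hzx]

theorem pvSlice_mid (pre mid post : List Char) :
    PySem.List.slice (pre ++ mid ++ post) (some (pre.length : Int))
      (some ((pre.length : Int) + (mid.length : Int))) = mid := by
  have h : ((pre.length : Int) + (mid.length : Int)) = (((pre.length + mid.length : Nat)) : Int) := by
    push_cast; ring
  rw [h, PySem.List.slice_natCast]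
  rw [List.append_assoc, List.drop_left, Nat.add_sub_cancel_left, List.take_left]

def pvInv (R : List (List Char)) (bs bl : Int) : Prop :=
  (R = [] ∧ bs = 0 ∧ bl = 0) ∨
  ∃ R₁ r R₂, R = R₁ ++ r :: R₂ ∧ bs = (R₁.flatten.length : Int) ∧ bl = (r.length : Int) ∧
    pvPickL none R = some r

def pvOutB (cs : List Char) (acc : Int × Int × Int) : List Char :=
  PySem.List.slice cs (some acc.1) (some (acc.1 + acc.2.1))

theorem pvPickA_eq (R : List (List Char)) (sub : List Char) (hsub : sub ≠ []) :
    pvPickS none ((R.filter (fun r => decide (1 < r.length))).map String.ofList ++ [String.ofList sub])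
      = (pvSel (pvPickL none R) sub).map String.ofList := by
  have h1 : (R.filter (fun r => decide (1 < r.length))).map String.ofList ++ [String.ofList sub]
      = ((R.filter (fun r => decide (1 < r.length))) ++ [sub]).map String.ofList := by simp
  rw [h1]
  have h2 := pvPick_map ((R.filter (fun r => decide (1 < r.length))) ++ [sub]) none
  simp only [Option.map_none] at h2
  rw [h2, pvPick_filter sub hsub R none
    (fun x _ hx => le_trans (Nat.not_lt.1 hx) (List.length_pos_iff.2 hsub))]
  have h3 : pvPickL none (R ++ [sub]) = pvSel (pvPickL none R) sub := by
    simp [pvPickL, List.foldl_append]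
  rw [h3]

theorem pvMain (cs : List Char) : ∀ (rest : List Char) (R : List (List Char)) (sub : List Char) (bs bl : Int),
    sub ≠ [] →
    R.flatten ++ (sub ++ rest) = cs →
    pvInv R bs bl →
    ∃ rf : List Char,
      pvPickS none (List.foldl (pvStepA (cs.length : Int))
          ((R.filter (fun r => decide (1 < r.length))).map String.ofList ++
            (if rest = [] then [String.ofList sub] else []), sub)
          (PySem.List.enumerate rest ((R.flatten.length + sub.length : Nat) : Int))).1
        = some (String.ofList rf) ∧
      pvOutB cs (List.foldl (pvStepB cs (cs.length : Int)) (bs, bl, (R.flatten.length : Int))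
          (PySem.List.pyRange ((R.flatten.length + sub.length : Nat) : Int) ((cs.length : Int) + 1))) = rf := by
  intro rest
  induction rest with
  | nil =>
    intro R sub bs bl hsub hflat hinv
    have hJ : R.flatten.length + sub.length = cs.length := by
      rw [← hflat]; simp
    have hcast : ((R.flatten.length + sub.length : Nat) : Int) = (cs.length : Int) := by
      exact_mod_cast hJ
    have hsubpos : 0 < sub.length := List.length_pos_iff.2 hsub
    have hst : (cs.length : Int) - (R.flatten.length : Int) = (sub.length : Int) := by omega
    rw [hcast, PySem.List.pyRange_one_cons (by omega), PySem.List.pyRange_one_eq_nil (le_refl _)]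
    simp only [PySem.List.enumerate, List.foldl_nil, List.foldl_cons]
    rw [if_pos trivial, pvPickA_eq R sub hsub]
    rcases hinv with ⟨rfl, rfl, rfl⟩ | ⟨R₁, r, R₂, rfl, rfl, rfl, hpick⟩
    · have hB : pvStepB cs (cs.length : Int) (0, 0, (List.flatten ([] : List (List Char))).length)
          (cs.length : Int) = (0, (sub.length : Int), (cs.length : Int)) := by
        simp only [pvStepB]
        rw [if_pos (Or.inl trivial), if_pos (by simp), hst]
        simp
      refine ⟨sub, by simp [pvPickL, pvSel], ?_⟩
      rw [hB]
      simp only [pvOutB]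
      have hcs : cs = ([] : List Char) ++ sub ++ [] := by simp [← hflat]
      rw [hcs]
      have h := pvSlice_mid [] sub []
      simpa using h
    · rw [hpick]
      by_cases hrl : r.length ≤ sub.length
      · have hB : pvStepB cs (cs.length : Int)
            ((R₁.flatten.length : Int), (r.length : Int), ((R₁ ++ r :: R₂).flatten.length : Int))
            (cs.length : Int)
            = (((R₁ ++ r :: R₂).flatten.length : Int), (sub.length : Int), (cs.length : Int)) := by
          simp only [pvStepB]
          rw [if_pos (Or.inl trivial), if_pos (by rw [hst]; exact_mod_cast hrl)]
          rw [hst]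
        refine ⟨sub, by simp [pvSel, hrl], ?_⟩
        rw [hB]
        simp only [pvOutB]
        have hcs : cs = ((R₁ ++ r :: R₂).flatten) ++ sub ++ [] := by simp [← hflat]
        rw [hcs]
        exact pvSlice_mid _ sub []
      · have hB : pvStepB cs (cs.length : Int)
            ((R₁.flatten.length : Int), (r.length : Int), ((R₁ ++ r :: R₂).flatten.length : Int))
            (cs.length : Int)
            = ((R₁.flatten.length : Int), (r.length : Int), (cs.length : Int)) := by
          simp only [pvStepB]
          rw [if_pos (Or.inl trivial), if_neg (by rw [hst]; exact_mod_cast hrl)]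
        refine ⟨r, by simp [pvSel, hrl], ?_⟩
        rw [hB]
        simp only [pvOutB]
        have hcs : cs = R₁.flatten ++ r ++ (R₂.flatten ++ sub) := by
          rw [← hflat]; simp
        rw [hcs]
        exact pvSlice_mid _ r _
  | cons c rest' ih =>
    intro R sub bs bl hsub hflat hinv
    have hsubpos : 0 < sub.length := List.length_pos_iff.2 hsub
    have hlen : R.flatten.length + sub.length + 1 + rest'.length = cs.length := by
      rw [← hflat]; simp [List.length_append]; omega
    have hJlt : R.flatten.length + sub.length < cs.length := by omega
    have hEnum : PySem.List.enumerate (c :: rest') ((R.flatten.length + sub.length : Nat) : Int)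
        = (((R.flatten.length + sub.length : Nat) : Int), c)
          :: PySem.List.enumerate rest' (((R.flatten.length + sub.length : Nat) : Int) + 1) := rfl
    have hRange : PySem.List.pyRange ((R.flatten.length + sub.length : Nat) : Int) ((cs.length : Int) + 1)
        = ((R.flatten.length + sub.length : Nat) : Int)
          :: PySem.List.pyRange (((R.flatten.length + sub.length : Nat) : Int) + 1) ((cs.length : Int) + 1) :=
      PySem.List.pyRange_one_cons (by omega)
    have hL : (PySem.List.pyGet? sub (-1)).getD ' ' = sub.getLast hsub := by
      rw [PySem.List.pyGet?_neg_one, List.getLast?_eq_some_getLast hsub]; rfl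
    have hdrop : sub.dropLast ++ [sub.getLast hsub] = sub := List.dropLast_concat_getLast hsub
    have hgetJ : PySem.List.pyGet? cs ((R.flatten.length + sub.length : Nat) : Int) = some c := by
      have h1 : cs = (R.flatten ++ sub) ++ c :: rest' := by rw [← hflat]; simp
      have h2 : ((R.flatten.length + sub.length : Nat) : Int) = ((R.flatten ++ sub).length : Int) := by
        simp [List.length_append]
      rw [h1, h2]; exact PySem.List.pyGet?_append_length _ _ _
    have hgetJ1 : PySem.List.pyGet? cs (((R.flatten.length + sub.length : Nat) : Int) - 1)
        = some (sub.getLast hsub) := by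
      have h1 : cs = (R.flatten ++ sub.dropLast) ++ sub.getLast hsub :: (c :: rest') := by
        rw [← hflat]
        conv_lhs => rw [← hdrop]
        simp
      have hdl : sub.dropLast.length + 1 = sub.length := by
        conv_rhs => rw [← hdrop]
        simp
      have h2 : (((R.flatten.length + sub.length : Nat) : Int) - 1)
          = ((R.flatten ++ sub.dropLast).length : Int) := by
        simp only [List.length_append]; push_cast; omega
      rw [h1, h2]; exact PySem.List.pyGet?_append_length _ _ _
    have hiff : (((R.flatten.length + sub.length : Nat) : Int) = (cs.length : Int) - 1) ↔ rest' = [] := by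
      constructor
      · intro h
        have : rest'.length = 0 := by omega
        exact List.length_eq_zero_iff.1 this
      · intro h; subst h
        simp only [List.length_nil] at hlen
        omega
    rw [hEnum, hRange]
    simp only [List.foldl_cons]
    rw [if_neg (List.cons_ne_nil c rest')]
    by_cases hcmp : (sub.getLast hsub).toNat ≤ c.toNat
    · -- run continues
      have hA : pvStepA (cs.length : Int)
          ((R.filter (fun r => decide (1 < r.length))).map String.ofList ++ [], sub)
          (((R.flatten.length + sub.length : Nat) : Int), c)
          = ((R.filter (fun r => decide (1 < r.length))).map String.ofList ++
              (if rest' = [] then [String.ofList (sub ++ [c])] else []), sub ++ [c]) := by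
        simp only [pvStepA]
        rw [if_pos (show (((R.flatten.length + sub.length : Nat) : Int)) ≠ 0 by omega)]
        rw [hL, if_pos hcmp]
        by_cases hre : rest' = []
        · rw [if_pos (hiff.2 hre), if_pos hre]
          simp
        · rw [if_neg (fun h => hre (hiff.1 h)), if_neg hre]
      have hB : pvStepB cs (cs.length : Int) (bs, bl, (R.flatten.length : Int))
          (((R.flatten.length + sub.length : Nat) : Int)) = (bs, bl, (R.flatten.length : Int)) := by
        simp only [pvStepB]
        rw [hgetJ, hgetJ1]
        rw [if_neg (by push_neg; exact ⟨by omega, by simp [Option.getD_some]; omega⟩)]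
      rw [hA, hB]
      have hihres := ih R (sub ++ [c]) bs bl (by simp) (by rw [← hflat]; simp) hinv
      have hlc : (sub ++ [c]).length = sub.length + 1 := by simp
      rw [hlc] at hihres
      have hc1 : ((R.flatten.length + (sub.length + 1) : Nat) : Int)
          = ((R.flatten.length + sub.length : Nat) : Int) + 1 := by push_cast; ring
      rw [hc1] at hihres
      exact hihres
    · -- run breaks at c
      have hfilt : ((R ++ [sub]).filter (fun r => decide (1 < r.length))).map String.ofList
          = (R.filter (fun r => decide (1 < r.length))).map String.ofList ++
            (if sub.length > 1 then [String.ofList sub] else []) := by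
        rw [List.filter_append, List.map_append]
        by_cases h1 : 1 < sub.length
        · simp [List.filter, h1]
        · simp [List.filter, h1]
      have hA : pvStepA (cs.length : Int)
          ((R.filter (fun r => decide (1 < r.length))).map String.ofList ++ [], sub)
          (((R.flatten.length + sub.length : Nat) : Int), c)
          = (((R ++ [sub]).filter (fun r => decide (1 < r.length))).map String.ofList ++
              (if rest' = [] then [String.ofList [c]] else []), [c]) := by
        simp only [pvStepA]
        rw [if_pos (show (((R.flatten.length + sub.length : Nat) : Int)) ≠ 0 by omega)]
        rw [hL, if_neg hcmp, hfilt]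
        by_cases hre : rest' = []
        · rw [if_pos (hiff.2 hre), if_pos hre]
          by_cases h1 : 1 < sub.length <;> simp [h1]
        · rw [if_neg (fun h => hre (hiff.1 h)), if_neg hre]
          by_cases h1 : 1 < sub.length <;> simp [h1]
      have hflat' : (R ++ [sub]).flatten ++ ([c] ++ rest') = cs := by
        rw [← hflat]; simp
      have hflen : (R ++ [sub]).flatten.length = R.flatten.length + sub.length := by simp
      have hcond : (((R.flatten.length + sub.length : Nat) : Int) = (cs.length : Int) ∨
          ((PySem.List.pyGet? cs ((R.flatten.length + sub.length : Nat) : Int)).getD ' ').toNat <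
            ((PySem.List.pyGet? cs (((R.flatten.length + sub.length : Nat) : Int) - 1)).getD ' ').toNat) := by
        right
        rw [hgetJ, hgetJ1]
        simp only [Option.getD_some]
        omega
      have hstsub : ((R.flatten.length + sub.length : Nat) : Int) - (R.flatten.length : Int)
          = (sub.length : Int) := by push_cast; ring
      -- B's step and the new invariant, by cases on the old invariant
      have hstep : ∃ bs' bl', pvStepB cs (cs.length : Int) (bs, bl, (R.flatten.length : Int))
            (((R.flatten.length + sub.length : Nat) : Int))
            = (bs', bl', (((R ++ [sub]).flatten.length : Nat) : Int)) ∧ pvInv (R ++ [sub]) bs' bl' := by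
        rcases hinv with ⟨rfl, rfl, rfl⟩ | ⟨R₁, r, R₂, rfl, rfl, rfl, hpick⟩
        · refine ⟨0, (sub.length : Int), ?_, ?_⟩
          · simp only [pvStepB]
            rw [if_pos hcond, if_pos (by simp only [List.flatten_nil, List.length_nil,
              Nat.cast_zero, Nat.cast_add, Nat.cast_ofNat]; omega)]
            simp only [Prod.mk.injEq]
            refine ⟨?_, ?_, ?_⟩ <;> simp [hflen, hstsub] <;> omega
          · right
            exact ⟨[], sub, [], by simp, by simp, by simp, by simp [pvPickL, pvSel]⟩
        · have hpick' : pvPickL none ((R₁ ++ r :: R₂) ++ [sub]) = pvSel (some r) sub := by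
            rw [show pvPickL none ((R₁ ++ r :: R₂) ++ [sub])
                = pvSel (pvPickL none (R₁ ++ r :: R₂)) sub from by
              simp only [pvPickL, List.foldl_append, List.foldl_cons, List.foldl_nil], hpick]
          by_cases hrl : r.length ≤ sub.length
          · refine ⟨((R₁ ++ r :: R₂).flatten.length : Int), (sub.length : Int), ?_, ?_⟩
            · simp only [pvStepB]
              rw [if_pos hcond, if_pos (by rw [hstsub]; exact_mod_cast hrl)]
              simp only [Prod.mk.injEq]
              refine ⟨?_, ?_, ?_⟩ <;> simp [hflen, hstsub] <;> omega
            · right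
              refine ⟨R₁ ++ r :: R₂, sub, [], by simp, rfl, rfl, ?_⟩
              rw [hpick']
              simp [pvSel, hrl]
          · refine ⟨((R₁.flatten.length : Nat) : Int), ((r.length : Nat) : Int), ?_, ?_⟩
            · simp only [pvStepB]
              rw [if_pos hcond, if_neg (by rw [hstsub]; exact_mod_cast hrl)]
              simp only [Prod.mk.injEq]
              refine ⟨?_, ?_, ?_⟩ <;> simp [hflen, hstsub] <;> omega
            · right
              refine ⟨R₁, r, R₂ ++ [sub], by simp, rfl, rfl, ?_⟩
              rw [hpick']
              simp [pvSel, hrl]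
      rcases hstep with ⟨bs', bl', hB, hinv'⟩
      rw [hA, hB]
      have hihres := ih (R ++ [sub]) [c] bs' bl' (by simp) hflat' hinv'
      have hc1 : (((R ++ [sub]).flatten.length + ([c] : List Char).length : Nat) : Int)
          = ((R.flatten.length + sub.length : Nat) : Int) + 1 := by
        push_cast [hflen, List.length_singleton]
        ring
      rw [hc1] at hihres
      have hc2 : (((R ++ [sub]).flatten.length : Nat) : Int) = ((R.flatten.length : Nat) : Int) + (sub.length : Int) := by
        push_cast [hflen]
        ring
      rw [hc2] at hihres
      rw [show (((R ++ [sub]).flatten.length : Nat) : Int) = ((R.flatten.length : Nat) : Int) + (sub.length : Int) from hc2] at hB ⊢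
      exact hihres

theorem portB_eq' (s : String) : longest_alpha_substring_alt s =
    String.ofList (pvOutB s.toList (List.foldl (pvStepB s.toList (s.toList.length : Int)) (0, 0, 0)
      (PySem.List.pyRange 1 ((s.toList.length : Int) + 1)))) := rfl

theorem pvSpecAux : ∀ (s : String), s ≠ "" →
    longest_alpha_substring s = longest_alpha_substring_alt s := by
  intro s hpre
  rw [portA_eq, portB_eq']
  have hne : s.toList ≠ [] := by
    intro h
    exact hpre (by simpa using congrArg String.ofList h)
  obtain ⟨c0, rest, hcs⟩ : ∃ c0 rest, s.toList = c0 :: rest := by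
    cases h : s.toList with
    | nil => exact absurd h hne
    | cons a t => exact ⟨a, t, rfl⟩
  rw [hcs]
  simp only [List.length_cons]
  have hmain := pvMain (c0 :: rest) rest [] [c0] 0 0 (by simp) (by simp)
    (Or.inl ⟨rfl, rfl, rfl⟩)
  simp only [List.filter_nil, List.map_nil, List.nil_append, List.flatten_nil,
    List.length_nil, List.length_cons, Nat.zero_add, Nat.cast_one, Nat.cast_zero] at hmain
  obtain ⟨rf, hA, hB⟩ := hmain
  have hstep0 : pvStepA (((rest.length + 1 : Nat)) : Int) ([], []) (0, c0)
      = ((if rest = [] then [String.ofList [c0]] else []), [c0]) := by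
    by_cases hre : rest = []
    · subst hre
      simp [pvStepA]
    · have h1 : ¬((0 : Int) = (rest.length : Int)) := by
        have h2 : rest.length ≠ 0 := by simpa [List.length_eq_zero_iff] using hre
        omega
      simp [pvStepA, h1, hre]
  have hfold : List.foldl (pvStepA (((rest.length + 1 : Nat)) : Int)) ([], [])
        (PySem.List.enumerate (c0 :: rest) 0)
      = List.foldl (pvStepA (((rest.length + 1 : Nat)) : Int))
        ((if rest = [] then [String.ofList [c0]] else []), [c0]) (PySem.List.enumerate rest 1) := by
    rw [show PySem.List.enumerate (c0 :: rest) 0 = (0, c0) :: PySem.List.enumerate rest 1 from rfl,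
      List.foldl_cons, hstep0]
  rw [hfold, PySem.List.pyGet?_neg_one, pvSorted_getLast, hA]
  simp only [Option.getD_some]
  rw [hB]

-- ===== VERDICT (by name: the statement is the Claim_ definition above) =====
theorem longest_alpha_substring_spec : Claim_equal_longest_alpha_substring :=
  fun s _ hpre => pvSpecAux s hpre
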